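-- pv_equiv track=rewrite | github.com/wonaya/demo_binder | callers/runCallersHelpers.py | aggregate_indels
-- ===== SOURCE A (Python) =====
-- def aggregate_indels(indels):
-- 	"""Aggregate counts of each indel type across simulated samples"""
-- 	aggregated_indels = {}
-- 	for name in indels:
-- 		for key in indels[name]:
-- 			if key not in aggregated_indels:
-- 				aggregated_indels[key] = 0
-- 			aggregated_indels[key] += indels[name][key]
-- 	return aggregated_indels
-- ===== SOURCE B (Python) =====
-- def aggregate_indels(indels):
--     """Aggregate counts of each indel type across simulated samples"""
--     pairs = [(key, count) for counts in indels.values() for key, count in counts.items()]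
--     keys = list(dict.fromkeys(key for key, _ in pairs))
--     return {key: sum(c for k, c in pairs if k == key) for key in keys}
-- ===== Notes on version B (the rewrite author's own statement) =====
-- stated objective: alternative
-- what changed: Replaces A's single-pass dict accumulator with a staged pipeline: flatten all inner dicts into one (key, count) pair list, dedup the keys in first-occurrence order, then build the result by summing each key's counts over the flat list.
import Mathlib
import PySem

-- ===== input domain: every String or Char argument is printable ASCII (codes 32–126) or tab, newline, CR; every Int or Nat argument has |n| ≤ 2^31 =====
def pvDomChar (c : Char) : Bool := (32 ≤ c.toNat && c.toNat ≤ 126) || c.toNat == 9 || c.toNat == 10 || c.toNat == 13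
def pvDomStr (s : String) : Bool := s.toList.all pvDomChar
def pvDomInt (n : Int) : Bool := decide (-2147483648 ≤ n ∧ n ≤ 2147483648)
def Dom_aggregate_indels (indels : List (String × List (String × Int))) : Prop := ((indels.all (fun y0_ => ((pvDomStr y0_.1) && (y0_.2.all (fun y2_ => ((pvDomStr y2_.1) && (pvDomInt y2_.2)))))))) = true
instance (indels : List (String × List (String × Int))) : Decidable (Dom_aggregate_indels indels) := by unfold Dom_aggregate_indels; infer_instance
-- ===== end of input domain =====

-- B replaces A's single-pass dict accumulator by a staged pipeline (flatten, dedup keys, per-key sums); alternative decomposition, same results.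

-- ===== PORT A =====
-- A iterates the outer dict's keys, then each inner dict's keys, inserting 0 on first sight
-- and then adding the inner value; returns the accumulated dict.
def aggregate_indels (indels : List (String × List (String × Int))) : List (String × Int) :=
  let d := PySem.Dict.ofList indels
  let agg := d.keys.foldl (fun agg name =>
      let inner := PySem.Dict.ofList (d.getD name [])
      inner.keys.foldl (fun agg key =>
          let agg := if agg.contains key then agg else agg.insert key 0
          agg.insert key (agg.getD key 0 + inner.getD key 0)) agg)
    PySem.Dict.empty
  agg.items

-- ===== PORT B =====
-- B flattens all inner dicts' items into one pair list, takes the keys deduped in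
-- first-occurrence order (dict.fromkeys), and builds the result dict by summing, for each
-- such key, the counts of the matching pairs of the flat list.
def aggregate_indels_alt (indels : List (String × List (String × Int))) : List (String × Int) :=
  let pairs := (PySem.Dict.ofList indels).values.flatMap (fun counts => (PySem.Dict.ofList counts).items)
  let keys := PySem.List.dedup (pairs.map Prod.fst)
  keys.map (fun key => (key, ((pairs.filter (fun p => p.1 == key)).map Prod.snd).sum))

-- ===== PRECONDITION & SPEC =====
def Spec_aggregate_indels (indels : List (String × List (String × Int))) (out : List (String × Int)) : Prop := out = aggregate_indels_alt indels
instance (indels : List (String × List (String × Int))) (out : List (String × Int)) : Decidable (Spec_aggregate_indels indels out) := by unfold Spec_aggregate_indels; infer_instance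

-- ===== CLAIM (what is proved, stated in full; the proofs are below) =====
def Claim_equal_aggregate_indels : Prop := ∀ (indels : List (String × List (String × Int))), Dom_aggregate_indels indels → Spec_aggregate_indels indels (aggregate_indels indels)

-- ===== LEMMAS AND PROOFS =====

-- A's guarded "insert 0 then add" at one key equals a single modify-with-default.
theorem pv_step_eq (agg : PySem.Dict String Int) (k : String) (v : Int) :
    (let agg' := if agg.contains k then agg else agg.insert k 0
     agg'.insert k (agg'.getD k 0 + v)) = agg.modify k 0 (· + v) := by
  by_cases h : agg.contains k = true
  · simp [h, PySem.Dict.modify]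
  · have h' : agg.contains k = false := by simpa using h
    simp [h', PySem.Dict.modify, PySem.Dict.getD_insert_self, PySem.Dict.insert_insert_self,
      PySem.Dict.getD_of_not_contains agg 0 h']

-- A's inner key-loop equals a fold of modify over the inner dict's items.
theorem pv_inner_eq (inner : PySem.Dict String Int) (hnd : inner.keys.Nodup)
    (agg : PySem.Dict String Int) :
    inner.keys.foldl (fun agg key =>
        let agg' := if agg.contains key then agg else agg.insert key 0
        agg'.insert key (agg'.getD key 0 + inner.getD key 0)) agg
      = inner.items.foldl (fun total p => total.modify p.1 0 (· + p.2)) agg := by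
  rw [PySem.Dict.items_eq_map_keys inner hnd 0, List.foldl_map]
  exact PySem.List.foldl_congr_mem _ _ _ agg (fun agg _ hk => pv_step_eq agg _ _)

-- a nested fold is a fold over the flattened list
theorem pv_foldl_flatMap {α β γ : Type} (l : List α) (g : α → List β)
    (f : γ → β → γ) (init : γ) :
    l.foldl (fun acc x => (g x).foldl f acc) init = (l.flatMap g).foldl f init := by
  induction l generalizing init with
  | nil => rfl
  | cons x t ih => simp [List.flatMap_cons, List.foldl_append, ih]

-- value at k of the modify-accumulating fold = initial value + sum of matching counts
theorem pv_getD_foldl_modify_add (l : List (String × Int)) (d : PySem.Dict String Int)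
    (k : String) :
    (l.foldl (fun d p => d.modify p.1 0 (· + p.2)) d).getD k 0
      = d.getD k 0 + ((l.filter (fun p => p.1 == k)).map Prod.snd).sum := by
  induction l generalizing d with
  | nil => simp
  | cons p t ih =>
    simp only [List.foldl_cons, ih, List.filter_cons]
    by_cases h : p.1 = k
    · subst h; simp [PySem.Dict.getD_modify_self]; ring
    · rw [PySem.Dict.getD_modify]
      simp [h, show ¬ k = p.1 from fun hh => h hh.symm]

-- A equals B: both produce, per distinct key in first-occurrence order, the total count.
theorem aggregate_indels_eq_alt (indels : List (String × List (String × Int))) :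
    aggregate_indels indels = aggregate_indels_alt indels := by
  unfold aggregate_indels aggregate_indels_alt
  dsimp only
  have hnd := PySem.Dict.nodup_keys_ofList indels
  rw [PySem.Dict.values_eq_map_keys _ hnd []]
  set pairs : List (String × Int) :=
    (((PySem.Dict.ofList indels).keys.map
        (fun name => (PySem.Dict.ofList indels).getD name [])).flatMap
      (fun counts => (PySem.Dict.ofList counts).items)) with hpairs
  have hA : ((PySem.Dict.ofList indels).keys.foldl (fun agg name =>
      let inner := PySem.Dict.ofList ((PySem.Dict.ofList indels).getD name [])
      inner.keys.foldl (fun agg key =>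
          let agg := if agg.contains key then agg else agg.insert key 0
          agg.insert key (agg.getD key 0 + inner.getD key 0)) agg)
        PySem.Dict.empty)
      = pairs.foldl (fun d p => d.modify p.1 0 (· + p.2)) PySem.Dict.empty := by
    rw [hpairs, ← pv_foldl_flatMap, List.foldl_map]
    exact PySem.List.foldl_congr_mem _ _ _ _ (fun agg name _ =>
      pv_inner_eq (PySem.Dict.ofList ((PySem.Dict.ofList indels).getD name []))
        (PySem.Dict.nodup_keys_ofList _) agg)
  rw [hA]
  have hkeys : (pairs.foldl (fun d p => d.modify p.1 0 (· + p.2)) PySem.Dict.empty).keys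
      = PySem.Set.ofList (pairs.map Prod.fst) := by
    rw [PySem.Dict.keys_foldl_modify_key pairs Prod.fst 0 (fun _ p => (· + p.2)) PySem.Dict.empty]
    simp [PySem.Dict.keys_empty, PySem.Set.update_nil_left]
  have hnodup : (pairs.foldl (fun d p => d.modify p.1 0 (· + p.2)) PySem.Dict.empty).keys.Nodup :=
    PySem.Dict.nodup_keys_foldl_modify_key pairs Prod.fst 0 (fun _ p => (· + p.2))
      PySem.Dict.empty PySem.Dict.nodup_keys_empty
  rw [PySem.Dict.items_eq_map_keys _ hnodup 0, hkeys, PySem.List.dedup_eq_ofList]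
  exact List.map_congr_left (fun k _ => by
    rw [pv_getD_foldl_modify_add pairs PySem.Dict.empty k]; simp)

-- ===== VERDICT (by name: the statement is the Claim_ definition above) =====
theorem aggregate_indels_spec : Claim_equal_aggregate_indels := by
  intro indels _
  exact aggregate_indels_eq_alt indels
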